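-- pv_equiv track=rewrite | github.com/jonharrity/euler | src/e36.py | get_pals_to_len
-- ===== SOURCE A (Python) =====
-- def get_pals_to_len(x):#return list of binary palindromes up to string length x
--
-- 	cache = {0: [''], 1: ['0','1']}
--
-- 	def _(x):
-- 		if x in cache:
-- 			return cache[x]
-- 		else:
-- 			prev = _(x-2)
-- 			newitem = ['0'+s+'0' for s in prev] + ['1'+s+'1' for s in prev]
-- 			cache[x] = newitem
-- 			return cache[x]
--
--
-- 	_(x)
-- 	ans = []
-- 	for i in range(1,x+1):
-- 		ans += _(i)
-- 	return ans
-- ===== SOURCE B (Python) =====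
-- def get_pals_to_len(x):
--     # Build the list of k-bit first halves once per width k (in binary order, by
--     # appending a trailing bit to each (k-1)-bit half), then mirror each half
--     # into a palindrome of length L; reused for the two lengths sharing a width.
--     ans = []
--     hs = ['']
--     k = 0
--     for L in range(1, x + 1):
--         if (L + 1) // 2 > k:
--             k += 1
--             hs = [h + b for h in hs for b in '01']
--         m = L // 2
--         ans += [h + h[:m][::-1] for h in hs]
--     return ans
-- ===== Notes on version B (the rewrite author's own statement) =====
-- stated objective: alternative
-- what changed: Replaces A's memoized two-step recursion (wrapping shorter palindromes in 0...0/1...1) by a forward loop that keeps the list of binary first halves of the current width, widens it by appending a trailing bit when the width grows, and mirrors each half into a palindrome of length L.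
import Mathlib
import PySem

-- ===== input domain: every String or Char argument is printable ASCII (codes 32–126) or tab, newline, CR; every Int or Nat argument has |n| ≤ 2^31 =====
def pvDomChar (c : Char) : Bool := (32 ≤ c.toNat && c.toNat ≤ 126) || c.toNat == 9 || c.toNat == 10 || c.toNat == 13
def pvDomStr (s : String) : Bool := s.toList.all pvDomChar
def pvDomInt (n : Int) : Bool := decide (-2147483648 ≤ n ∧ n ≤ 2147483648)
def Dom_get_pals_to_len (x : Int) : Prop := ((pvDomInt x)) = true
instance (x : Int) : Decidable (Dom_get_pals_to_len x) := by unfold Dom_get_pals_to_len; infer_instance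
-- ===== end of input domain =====

-- B replaces A's memoized two-step recursion (wrapping shorter palindromes in
-- 0…0/1…1) by mirroring explicit first-half lists built once per width; objective: simpler.

-- ===== PORT A =====
-- A's inner memoized function `_`: the cache is pure memoization (the value for a key
-- is always the same), so the port is the same recursion without the threaded dict;
-- strings are built as List Char ('0'+s+'0' → '0' :: s ++ ['0']) and ofList'd at the end.
def pvAHelper : Nat → List (List Char)
  | 0 => [[]]
  | 1 => [['0'], ['1']]
  | (n+2) =>
    let prev := pvAHelper n
    (prev.map (fun s => '0' :: s ++ ['0'])) ++ (prev.map (fun s => '1' :: s ++ ['1']))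

def get_pals_to_len (x : Int) : List String :=
  -- the initial `_(x)` call only fills the cache; then ans += _(i) for i in range(1, x+1)
  (PySem.List.pyRange 1 (x+1) 1).foldl
    (fun ans i => ans ++ (pvAHelper i.toNat).map String.ofList) []

-- ===== PORT B =====
-- loop body of B: state (ans, hs, k); widen the half list when (L+1)//2 > k,
-- then append [h + h[:L//2][::-1] for h in hs]
def pvStep : (List String × List (List Char) × Nat) → Int → (List String × List (List Char) × Nat)
  | (ans, hs, k), L =>
    let p := if k < (L.toNat + 1) / 2
      then (hs.flatMap (fun h => [h ++ ['0'], h ++ ['1']]), k + 1)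
      else (hs, k)
    (ans ++ p.1.map (fun h => String.ofList (h ++ (h.take (L.toNat / 2)).reverse)), p.1, p.2)

def get_pals_to_len_alt (x : Int) : List String :=
  ((PySem.List.pyRange 1 (x+1) 1).foldl pvStep ([], [[]], 0)).1

-- ===== PRECONDITION & SPEC =====
-- Pre_ excludes negative x, where Python A raises RecursionError (its inner `_` recurses without end).
def Pre_get_pals_to_len (x : Int) : Prop := 0 ≤ x
instance (x : Int) : Decidable (Pre_get_pals_to_len x) := by unfold Pre_get_pals_to_len; infer_instance
def pvWitness_get_pals_to_len : Int := 4

def Spec_get_pals_to_len (x : Int) (out : List String) : Prop := out = get_pals_to_len_alt x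
instance (x : Int) (out : List String) : Decidable (Spec_get_pals_to_len x out) := by unfold Spec_get_pals_to_len; infer_instance

-- ===== CLAIM (what is proved, stated in full; the proofs are below) =====
def Claim_equal_get_pals_to_len : Prop := ∀ (x : Int), Dom_get_pals_to_len x → Pre_get_pals_to_len x → Spec_get_pals_to_len x (get_pals_to_len x)

-- ===== LEMMAS AND PROOFS =====

-- B's binary halves, abstractly: the k-digit binary writing of h, MSB first.
def pvBin : Nat → Nat → List Char
  | 0, _ => []
  | (k+1), h => pvBin k (h / 2) ++ [if h % 2 == 1 then '1' else '0']

-- the palindrome of length L built from half index h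
def pvPal (L h : Nat) : List Char :=
  let half := pvBin ((L + 1) / 2) h
  half ++ (half.take (L / 2)).reverse

-- Leading-bit split of the k+1-digit binary writer.
theorem pvBin_lo : ∀ (k h : Nat), h < 2 ^ k → pvBin (k+1) h = '0' :: pvBin k h
  | 0, h, hh => by
    interval_cases h
    rfl
  | (k+1), h, hh => by
    have h2 : h / 2 < 2 ^ k := by omega
    show pvBin (k+1) (h / 2) ++ _ = _
    rw [pvBin_lo k (h / 2) h2]
    rfl

theorem pvBin_hi : ∀ (k h : Nat), h < 2 ^ k → pvBin (k+1) (2 ^ k + h) = '1' :: pvBin k h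
  | 0, h, hh => by
    interval_cases h
    rfl
  | (k+1), h, hh => by
    have e1 : (2 ^ (k+1) + h) / 2 = 2 ^ k + h / 2 := by omega
    have e2 : (2 ^ (k+1) + h) % 2 = h % 2 := by omega
    have h2 : h / 2 < 2 ^ k := by omega
    show pvBin (k+1) ((2 ^ (k+1) + h) / 2) ++ [if (2 ^ (k+1) + h) % 2 == 1 then '1' else '0'] = _
    rw [e1, e2, pvBin_hi k (h / 2) h2]
    rfl

theorem pvPal_lo (L h : Nat) (hh : h < 2 ^ ((L+1)/2)) :
    pvPal (L+2) h = '0' :: pvPal L h ++ ['0'] := by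
  have e : (L + 2 + 1) / 2 = (L + 1) / 2 + 1 := by omega
  have e2 : (L + 2) / 2 = L / 2 + 1 := by omega
  simp only [pvPal, e, e2, pvBin_lo _ _ hh, List.take_succ_cons, List.reverse_cons]
  simp

theorem pvPal_hi (L h : Nat) (hh : h < 2 ^ ((L+1)/2)) :
    pvPal (L+2) (2 ^ ((L+1)/2) + h) = '1' :: pvPal L h ++ ['1'] := by
  have e : (L + 2 + 1) / 2 = (L + 1) / 2 + 1 := by omega
  have e2 : (L + 2) / 2 = L / 2 + 1 := by omega
  simp only [pvPal, e, e2, pvBin_hi _ _ hh, List.take_succ_cons, List.reverse_cons]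
  simp

-- A's per-length block equals the binary-indexed palindromes of that length.
theorem pvKey : ∀ (L : Nat), pvAHelper L = (List.range (2 ^ ((L+1)/2))).map (pvPal L)
  | 0 => by decide
  | 1 => by decide
  | (L+2) => by
    have ih := pvKey L
    have e : (L + 2 + 1) / 2 = (L + 1) / 2 + 1 := by omega
    have esum : 2 ^ ((L+1)/2 + 1) = 2 ^ ((L+1)/2) + 2 ^ ((L+1)/2) := by ring
    show (pvAHelper L).map (fun s => '0' :: s ++ ['0']) ++ (pvAHelper L).map (fun s => '1' :: s ++ ['1']) = _
    rw [ih, e, esum, List.range_add, List.map_append, List.map_map, List.map_map,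
      List.map_map]
    congr 1
    · exact List.map_congr_left (fun h hm => by
        have := List.mem_range.mp hm
        simp [Function.comp, pvPal_lo L h this])
    · exact List.map_congr_left (fun h hm => by
        have := List.mem_range.mp hm
        simp [Function.comp, pvPal_hi L h this])

theorem pvRangeTwoMul (f : Nat → List Char) :
    ∀ n, (List.range (2*n)).map f = (List.range n).flatMap (fun j => [f (2*j), f (2*j+1)]) := by
  intro n
  induction n with
  | zero => simp
  | succ n ih =>
    have e : 2 * (n + 1) = (2 * n + 1) + 1 := by ring
    rw [e, List.range_succ, List.range_succ, List.range_succ, List.map_append,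
      List.map_append, ih, List.flatMap_append]
    simp

theorem pvBin_double (k j : Nat) : pvBin (k+1) (2*j) = pvBin k j ++ ['0'] := by
  have h1 : 2*j/2 = j := by omega
  have h2 : 2*j % 2 = 0 := by omega
  simp [pvBin, h1, h2]

theorem pvBin_double_succ (k j : Nat) : pvBin (k+1) (2*j+1) = pvBin k j ++ ['1'] := by
  have h1 : (2*j+1)/2 = j := by omega
  have h2 : (2*j+1) % 2 = 1 := by omega
  simp [pvBin, h1, h2]

-- one widening step of B's half list
theorem pvHalvesStep (k : Nat) :
    (List.range (2 ^ (k+1))).map (pvBin (k+1))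
      = ((List.range (2 ^ k)).map (pvBin k)).flatMap (fun h => [h ++ ['0'], h ++ ['1']]) := by
  have e : 2 ^ (k+1) = 2 * 2 ^ k := by ring
  rw [e, pvRangeTwoMul, List.flatMap_map]
  exact List.flatMap_congr (fun j _ => by
    simp [pvBin_double, pvBin_double_succ])

-- loop invariant: after lengths 1..n, B's state is (A's answer, halves of width (n+1)/2, (n+1)/2)
theorem pvInv : ∀ (n : Nat),
    (((List.range n).map (fun j : Nat => ((1:Int) + (j:Int)))).foldl pvStep ([], [[]], 0))
      = ( ((List.range n).map (fun j : Nat => ((1:Int) + (j:Int)))).foldl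
            (fun ans i => ans ++ (pvAHelper i.toNat).map String.ofList) [],
          (List.range (2 ^ ((n+1)/2))).map (pvBin ((n+1)/2)),
          (n+1)/2 ) := by
  intro n
  induction n with
  | zero => simp [pvBin]
  | succ n ih =>
    rw [List.range_succ, List.map_append, List.foldl_append, List.foldl_append, ih]
    have htn : ((1:Int) + n).toNat = n + 1 := by omega
    simp only [List.map_cons, List.map_nil, List.foldl_cons, List.foldl_nil]
    simp only [pvStep, htn]
    rcases Nat.even_or_odd n with ⟨t, ht⟩ | ⟨t, ht⟩
    · -- n = 2t: the width grows from t to t+1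
      have hk : (n+1)/2 = t := by omega
      have hk' : (n+1+1)/2 = t + 1 := by omega
      rw [if_pos (by omega : (n+1)/2 < (n+1+1)/2)]
      have hH : ((List.range (2 ^ ((n+1)/2))).map (pvBin ((n+1)/2))).flatMap
          (fun h => [h ++ ['0'], h ++ ['1']])
          = (List.range (2 ^ ((n+1+1)/2))).map (pvBin ((n+1+1)/2)) := by
        rw [hk, hk']
        exact (pvHalvesStep t).symm
      rw [hH]
      have hmap : ((List.range (2 ^ ((n+1+1)/2))).map (pvBin ((n+1+1)/2))).map
          (fun h => String.ofList (h ++ (h.take ((n+1)/2)).reverse))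
          = (pvAHelper (n+1)).map String.ofList := by
        rw [pvKey (n+1), List.map_map, List.map_map]
        refine List.map_congr_left (fun j _ => ?_)
        simp [Function.comp, pvPal, hk, hk']
      rw [hmap]
      refine Prod.ext rfl (Prod.ext rfl ?_)
      show (n+1)/2 + 1 = (n+1+1)/2
      omega
    · -- n = 2t+1: same width t+1
      have hk : (n+1)/2 = t + 1 := by omega
      have hk' : (n+1+1)/2 = t + 1 := by omega
      rw [if_neg (by omega : ¬ (n+1)/2 < (n+1+1)/2)]
      have hmap : ((List.range (2 ^ ((n+1)/2))).map (pvBin ((n+1)/2))).map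
          (fun h => String.ofList (h ++ (h.take ((n+1)/2)).reverse))
          = (pvAHelper (n+1)).map String.ofList := by
        rw [pvKey (n+1), List.map_map, List.map_map, hk, hk']
        refine List.map_congr_left (fun j _ => ?_)
        simp [Function.comp, pvPal, hk, hk']
      rw [hmap]
      refine Prod.ext rfl (Prod.ext ?_ ?_)
      · show (List.range (2 ^ ((n+1)/2))).map (pvBin ((n+1)/2))
            = (List.range (2 ^ ((n+1+1)/2))).map (pvBin ((n+1+1)/2))
        rw [hk, hk']
      · show (n+1)/2 = (n+1+1)/2
        omega

-- ===== VERDICT (by name: the statement is the Claim_ definition above) =====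
theorem get_pals_to_len_spec : Claim_equal_get_pals_to_len := by
  intro x _ hpre
  obtain ⟨n, rfl⟩ : ∃ n : Nat, x = n := ⟨x.toNat, (Int.toNat_of_nonneg hpre).symm⟩
  show get_pals_to_len n = get_pals_to_len_alt n
  unfold get_pals_to_len get_pals_to_len_alt
  rw [PySem.List.pyRange_one]
  have e : ((n:Int) + 1 - 1).toNat = n := by omega
  rw [e, pvInv n]
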